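-- pv_equiv track=rewrite | github.com/MrBrantCode/unitest_baseline | mut_generate/mist_train_taco/taco_7248/solution.py | calculate_maximum_power
-- ===== SOURCE A (Python) =====
-- def calculate_maximum_power(names):
--     def power_of_string(s):
--         sorted_s = sorted(s)
--         power = 0
--         for i, char in enumerate(sorted_s):
--             power += (i + 1) * (ord(char) - 96)
--         return power
--
--     return [power_of_string(name) for name in names]
-- ===== SOURCE B (Python) =====
-- def calculate_maximum_power(names):
--     result = []
--     for name in names:
--         pos = 0
--         power = 0
--         for ch in sorted(set(name)):
--             k = name.count(ch)
--             power += (ord(ch) - 96) * (pos * k + k * (k + 1) // 2)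
--             pos += k
--         result.append(power)
--     return result
-- ===== Notes on version B (the rewrite author's own statement) =====
-- stated objective: alternative
-- what changed: Instead of comparison-sorting every character and walking the sorted string with enumerate, B counts each distinct character and sorts only the distinct characters, adding each character's whole block of ranks via the closed form pos*k + k*(k+1)//2.
import Mathlib
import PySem

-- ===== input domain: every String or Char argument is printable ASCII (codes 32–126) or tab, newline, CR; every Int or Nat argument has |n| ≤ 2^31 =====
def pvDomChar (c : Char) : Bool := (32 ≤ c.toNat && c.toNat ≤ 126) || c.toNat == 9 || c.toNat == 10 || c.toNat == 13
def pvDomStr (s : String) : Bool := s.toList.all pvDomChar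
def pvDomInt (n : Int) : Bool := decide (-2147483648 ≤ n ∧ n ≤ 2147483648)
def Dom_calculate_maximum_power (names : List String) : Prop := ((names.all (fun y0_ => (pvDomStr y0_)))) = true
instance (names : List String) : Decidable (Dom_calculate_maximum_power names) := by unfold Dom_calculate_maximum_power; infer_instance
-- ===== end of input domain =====

-- B sorts only the distinct characters of each name and adds each character's block of
-- ranks via a closed form, instead of sorting the whole name and walking it (objective: alternative).

-- ===== PORT A =====
def calculate_maximum_power (names : List String) : List Int :=
  names.map (fun name =>
    (PySem.List.enumerate (PySem.List.sorted name.toList (fun c => c) false) 0).foldl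
      (fun power ic => power + (ic.1 + 1) * ((ic.2.toNat : Int) - 96)) 0)

-- ===== PORT B =====
def calculate_maximum_power_alt (names : List String) : List Int :=
  names.map (fun name =>
    ((PySem.List.sorted (PySem.Set.ofList name.toList) (fun c => c) false).foldl
      (fun (st : Int × Int) ch =>
        let k := ((name.toList.count ch : Nat) : Int)
        (st.1 + k, st.2 + ((ch.toNat : Int) - 96) * (st.1 * k + PySem.Int.floordiv (k * (k + 1)) 2)))
      (0, 0)).2)

-- ===== PRECONDITION & SPEC =====
def Spec_calculate_maximum_power (names : List String) (out : List Int) : Prop := out = calculate_maximum_power_alt names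
instance (names : List String) (out : List Int) : Decidable (Spec_calculate_maximum_power names out) := by unfold Spec_calculate_maximum_power; infer_instance

-- ===== CLAIM (what is proved, stated in full; the proofs are below) =====
def Claim_equal_calculate_maximum_power : Prop := ∀ (names : List String), Dom_calculate_maximum_power names → Spec_calculate_maximum_power names (calculate_maximum_power names)

-- ===== LEMMAS AND PROOFS =====

-- the counting-sorted form of s along a list l of characters
def pvBlocks (s : List Char) (l : List Char) : List Char :=
  l.flatMap (fun c => List.replicate (s.count c) c)

theorem pvBlocks_nil (s : List Char) : pvBlocks s [] = [] := rfl

theorem pvBlocks_cons (s : List Char) (c : Char) (l : List Char) :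
    pvBlocks s (c :: l) = List.replicate (s.count c) c ++ pvBlocks s l := rfl

theorem pvBlocks_append_singleton (s : List Char) (l : List Char) (c : Char) :
    pvBlocks s (l ++ [c]) = pvBlocks s l ++ List.replicate (s.count c) c := by
  simp [pvBlocks]

theorem pvBlocks_mem {s l : List Char} {y : Char} (h : y ∈ pvBlocks s l) : y ∈ l := by
  simp only [pvBlocks, List.mem_flatMap] at h
  obtain ⟨c, hc, hr⟩ := h
  rw [List.eq_of_mem_replicate hr]
  exact hc

theorem pvBlocks_pairwise {s l : List Char} (hl : l.Pairwise (· < ·)) :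
    (pvBlocks s l).Pairwise (· ≤ ·) := by
  induction l with
  | nil => simp [pvBlocks]
  | cons c l ih =>
    rw [List.pairwise_cons] at hl
    rw [pvBlocks_cons]
    refine List.pairwise_append.mpr ⟨List.pairwise_replicate.mpr (by simp), ih hl.2, ?_⟩
    intro x hx y hy
    rw [List.eq_of_mem_replicate hx]
    exact le_of_lt (hl.1 y (pvBlocks_mem hy))

theorem pvBlocks_count {s : List Char} {l : List Char} (hn : l.Nodup) (x : Char) :
    (pvBlocks s l).count x = if x ∈ l then s.count x else 0 := by
  induction l with
  | nil => simp [pvBlocks]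
  | cons c l ih =>
    rw [List.nodup_cons] at hn
    rw [pvBlocks_cons, List.count_append, List.count_replicate, ih hn.2]
    by_cases hx : x = c
    · subst hx
      simp [hn.1]
    · have hbc : (c == x) = false := by simpa using fun h : c = x => hx h.symm
      simp [hbc, List.mem_cons, hx]

theorem pv_ds_nodup (s : List Char) :
    (PySem.List.sorted (PySem.Set.ofList s) (fun c => c) false).Nodup :=
  ((PySem.List.sorted_perm (PySem.Set.ofList s) (fun c => c) false).symm).nodup
    (PySem.Set.nodup_ofList s)

theorem pv_ds_mem (s : List Char) (x : Char) :
    x ∈ PySem.List.sorted (PySem.Set.ofList s) (fun c => c) false ↔ x ∈ s := by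
  rw [PySem.List.mem_sorted, PySem.Set.mem_ofList]

theorem pvBlocks_perm (s : List Char) :
    (pvBlocks s (PySem.List.sorted (PySem.Set.ofList s) (fun c => c) false)).Perm s := by
  rw [List.perm_iff_count]
  intro x
  rw [pvBlocks_count (pv_ds_nodup s) x]
  by_cases hx : x ∈ s
  · simp [(pv_ds_mem s x).mpr hx]
  · have h1 : x ∉ PySem.List.sorted (PySem.Set.ofList s) (fun c => c) false := by
      rw [pv_ds_mem]; exact hx
    simp [h1, List.count_eq_zero.mpr hx]

theorem pv_sorted_eq_blocks (s : List Char) :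
    PySem.List.sorted s (fun c => c) false
    = pvBlocks s (PySem.List.sorted (PySem.Set.ofList s) (fun c => c) false) := by
  refine PySem.List.eq_of_perm_of_pairwise_le_of_injective (fun c => c) (fun a b hab => hab)
    ((PySem.List.sorted_perm s (fun c => c) false).trans (pvBlocks_perm s).symm) ?_ ?_
  · simpa using PySem.List.sorted_pairwise s (fun c => c)
  · simpa using pvBlocks_pairwise (s := s) (PySem.List.sorted_ofList_pairwise_lt s)

theorem pv_block_fold (k : Nat) (v : Char) (p q : Int) :
    (PySem.List.enumerate (List.replicate k v) p).foldl
      (fun power ic => power + (ic.1 + 1) * ((ic.2.toNat : Int) - 96)) q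
    = q + ((v.toNat : Int) - 96) * (p * k + ((k * (k + 1) / 2 : Nat) : Int)) := by
  induction k generalizing p q with
  | zero => simp [PySem.List.enumerate_nil]
  | succ k ih =>
    rw [List.replicate_succ, PySem.List.enumerate_cons, List.foldl_cons, ih]
    have hT : (k + 1) * (k + 1 + 1) / 2 = k * (k + 1) / 2 + (k + 1) := by
      have h2 : (k + 1) * (k + 1 + 1) = k * (k + 1) + 2 * (k + 1) := by ring
      obtain ⟨c, hc⟩ := Nat.even_mul_succ_self k
      omega
    rw [hT]
    push_cast
    ring

theorem pv_floordiv_count (c : Nat) :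
    PySem.Int.floordiv ((c : Int) * ((c : Int) + 1)) 2 = ((c * (c + 1) / 2 : Nat) : Int) := by
  have h := PySem.Int.floordiv_natCast (c * (c + 1)) 2
  push_cast at h ⊢
  exact h

theorem pv_main_fold (s : List Char) (l : List Char) :
    (l.foldl
      (fun (st : Int × Int) ch =>
        let k := ((s.count ch : Nat) : Int)
        (st.1 + k, st.2 + ((ch.toNat : Int) - 96) * (st.1 * k + PySem.Int.floordiv (k * (k + 1)) 2)))
      (0, 0))
    = (((pvBlocks s l).length : Int),
       (PySem.List.enumerate (pvBlocks s l) 0).foldl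
         (fun power ic => power + (ic.1 + 1) * ((ic.2.toNat : Int) - 96)) 0) := by
  induction l using List.reverseRecOn with
  | nil => simp [pvBlocks_nil, PySem.List.enumerate_nil]
  | append_singleton l c ih =>
    rw [List.foldl_append, ih, List.foldl_cons, List.foldl_nil]
    rw [pvBlocks_append_singleton, PySem.List.enumerate_append, List.foldl_append, pv_block_fold]
    simp only [pv_floordiv_count]
    rw [Prod.mk.injEq]
    constructor
    · simp only [List.length_append, List.length_replicate]
      push_cast; ring
    · push_cast; ring

theorem pv_per_name (s : List Char) :
    (PySem.List.enumerate (PySem.List.sorted s (fun c => c) false) 0).foldl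
      (fun power ic => power + (ic.1 + 1) * ((ic.2.toNat : Int) - 96)) 0
    = ((PySem.List.sorted (PySem.Set.ofList s) (fun c => c) false).foldl
        (fun (st : Int × Int) ch =>
          let k := ((s.count ch : Nat) : Int)
          (st.1 + k, st.2 + ((ch.toNat : Int) - 96) * (st.1 * k + PySem.Int.floordiv (k * (k + 1)) 2)))
        (0, 0)).2 := by
  rw [pv_sorted_eq_blocks s, pv_main_fold s]

-- ===== VERDICT (by name: the statement is the Claim_ definition above) =====
theorem calculate_maximum_power_spec : Claim_equal_calculate_maximum_power := by
  intro names _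
  unfold Spec_calculate_maximum_power calculate_maximum_power calculate_maximum_power_alt
  apply List.map_congr_left
  intro name _
  exact pv_per_name name.toList
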